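-- pv_equiv track=rewrite | github.com/Rudraagh/SceneForge | layout_engine.py | is_classroom_graph
-- ===== SOURCE A (Python) =====
-- from typing import Dict, Iterable, List, Optional, Tuple
--
-- DESK_KEYWORDS = ("desk", "table")
--
-- CHAIR_KEYWORDS = ("chair",)
--
-- BOARD_KEYWORDS = ("board", "blackboard")
--
-- def is_classroom_graph(graph: Dict, prompt: str = "") -> bool:
--     text = prompt.lower()
--     if any(token in text for token in ("classroom", "school", "lecture", "teacher", "student")):
--         return True
--
--     names = [str(node.get("name", "")).lower() for node in graph.get("nodes", [])]
--     desk_count = sum(1 for name in names if _matches(name, DESK_KEYWORDS))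
--     chair_count = sum(1 for name in names if _matches(name, CHAIR_KEYWORDS))
--     board_count = sum(1 for name in names if _matches(name, BOARD_KEYWORDS))
--     return desk_count >= 2 and chair_count >= 1 and board_count >= 1
--
-- def _matches(name: str, keywords: Iterable[str]) -> bool:
--     return any(keyword in name for keyword in keywords)
-- ===== SOURCE B (Python) =====
-- DESK_KEYWORDS = ("desk", "table")
-- CHAIR_KEYWORDS = ("chair",)
-- BOARD_KEYWORDS = ("board", "blackboard")
--
-- def is_classroom_graph(graph, prompt: str = "") -> bool:
--     text = prompt.lower()
--     for token in ("classroom", "school", "lecture", "teacher", "student"):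
--         if token in text:
--             return True
--     desk = chair = board = 0
--     for node in graph.get("nodes", []):
--         name = str(node.get("name", "")).lower()
--         if any(k in name for k in DESK_KEYWORDS):
--             desk += 1
--         if any(k in name for k in CHAIR_KEYWORDS):
--             chair += 1
--         if any(k in name for k in BOARD_KEYWORDS):
--             board += 1
--         if desk >= 2 and chair >= 1 and board >= 1:
--             return True
--     return False
-- ===== Notes on version B (the rewrite author's own statement) =====
-- stated objective: alternative
-- what changed: Replaces A's precomputed names list plus three separate comprehension scans (one per keyword category) with a single pass over the nodes that lowercases each name once, maintains three counters together, and returns True early as soon as the desk/chair/board thresholds are met.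
import Mathlib
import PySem

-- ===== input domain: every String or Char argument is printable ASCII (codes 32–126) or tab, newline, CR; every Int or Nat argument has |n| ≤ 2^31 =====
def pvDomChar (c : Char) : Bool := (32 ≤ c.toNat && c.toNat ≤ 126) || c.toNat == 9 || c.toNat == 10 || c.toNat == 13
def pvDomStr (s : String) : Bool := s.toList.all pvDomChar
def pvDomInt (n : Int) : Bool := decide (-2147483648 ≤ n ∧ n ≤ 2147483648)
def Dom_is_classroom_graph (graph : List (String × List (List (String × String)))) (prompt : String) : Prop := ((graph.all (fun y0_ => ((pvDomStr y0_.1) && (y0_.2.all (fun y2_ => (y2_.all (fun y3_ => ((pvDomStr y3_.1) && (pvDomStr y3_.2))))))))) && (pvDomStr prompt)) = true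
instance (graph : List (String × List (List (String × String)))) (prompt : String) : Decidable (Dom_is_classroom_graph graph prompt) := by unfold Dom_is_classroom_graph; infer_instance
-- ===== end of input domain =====

-- ===== PORT A =====
-- B differs from A: one combined pass with counters and early exit, instead of a names list and three separate counting scans.
def pv_matches (name : String) (keywords : List String) : Bool :=
  keywords.any (fun keyword => PySem.Str.isIn keyword name)

def is_classroom_graph (graph : List (String × List (List (String × String)))) (prompt : String) : Bool :=
  let text := PySem.Str.lower prompt
  if ["classroom", "school", "lecture", "teacher", "student"].any (fun token => PySem.Str.isIn token text) then
    true
  else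
    let names := ((PySem.Dict.mk graph).getD "nodes" []).map
      (fun node => PySem.Str.lower ((PySem.Dict.mk node).getD "name" ""))
    let desk_count : Int := names.foldl (fun acc name => if pv_matches name ["desk", "table"] then acc + 1 else acc) 0
    let chair_count : Int := names.foldl (fun acc name => if pv_matches name ["chair"] then acc + 1 else acc) 0
    let board_count : Int := names.foldl (fun acc name => if pv_matches name ["board", "blackboard"] then acc + 1 else acc) 0
    decide (desk_count ≥ 2) && decide (chair_count ≥ 1) && decide (board_count ≥ 1)

-- ===== PORT B =====
def pv_nameOf (node : List (String × String)) : String :=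
  PySem.Str.lower ((PySem.Dict.mk node).getD "name" "")

def pv_goB : List (List (String × String)) → Int → Int → Int → Bool
  | [], _, _, _ => false
  | node :: rest, desk, chair, board =>
    let name := pv_nameOf node
    let desk := if ["desk", "table"].any (fun k => PySem.Str.isIn k name) then desk + 1 else desk
    let chair := if ["chair"].any (fun k => PySem.Str.isIn k name) then chair + 1 else chair
    let board := if ["board", "blackboard"].any (fun k => PySem.Str.isIn k name) then board + 1 else board
    if desk ≥ 2 ∧ chair ≥ 1 ∧ board ≥ 1 then true else pv_goB rest desk chair board

def is_classroom_graph_alt (graph : List (String × List (List (String × String)))) (prompt : String) : Bool :=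
  let text := PySem.Str.lower prompt
  if ["classroom", "school", "lecture", "teacher", "student"].any (fun token => PySem.Str.isIn token text) then
    true
  else
    pv_goB ((PySem.Dict.mk graph).getD "nodes" []) 0 0 0

-- ===== PRECONDITION & SPEC =====
def Spec_is_classroom_graph (graph : List (String × List (List (String × String)))) (prompt : String) (out : Bool) : Prop := out = is_classroom_graph_alt graph prompt
instance (graph : List (String × List (List (String × String)))) (prompt : String) (out : Bool) : Decidable (Spec_is_classroom_graph graph prompt out) := by unfold Spec_is_classroom_graph; infer_instance

-- ===== CLAIM (what is proved, stated in full; the proofs are below) =====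
def Claim_equal_is_classroom_graph : Prop := ∀ (graph : List (String × List (List (String × String)))) (prompt : String), Dom_is_classroom_graph graph prompt → Spec_is_classroom_graph graph prompt (is_classroom_graph graph prompt)

-- ===== LEMMAS AND PROOFS =====

def pv_pd (node : List (String × String)) : Bool :=
  ["desk", "table"].any (fun k => PySem.Str.isIn k (pv_nameOf node))
def pv_pc (node : List (String × String)) : Bool :=
  ["chair"].any (fun k => PySem.Str.isIn k (pv_nameOf node))
def pv_pb (node : List (String × String)) : Bool :=
  ["board", "blackboard"].any (fun k => PySem.Str.isIn k (pv_nameOf node))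

-- B's early-exit loop, started below the thresholds, decides exactly the final-count condition.
lemma pv_goB_eq (rest : List (List (String × String))) (d c b : Int)
    (h : ¬(d ≥ 2 ∧ c ≥ 1 ∧ b ≥ 1)) :
    pv_goB rest d c b =
      decide (d + (rest.countP pv_pd : Int) ≥ 2 ∧ c + (rest.countP pv_pc : Int) ≥ 1 ∧
        b + (rest.countP pv_pb : Int) ≥ 1) := by
  induction rest generalizing d c b with
  | nil => simp only [pv_goB, List.countP_nil]; simp only [Nat.cast_zero, add_zero]
           exact (decide_eq_false h).symm
  | cons node rest ih =>
    simp only [pv_goB]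
    have hpd : (["desk", "table"].any (fun k => PySem.Str.isIn k (pv_nameOf node))) = pv_pd node := rfl
    have hpc : (["chair"].any (fun k => PySem.Str.isIn k (pv_nameOf node))) = pv_pc node := rfl
    have hpb : (["board", "blackboard"].any (fun k => PySem.Str.isIn k (pv_nameOf node))) = pv_pb node := rfl
    rw [hpd, hpc, hpb]
    cases h1 : pv_pd node <;> cases h2 : pv_pc node <;> cases h3 : pv_pb node <;>
      simp only [if_false, List.countP_cons, h1, h2, h3, Bool.false_eq_true,
        if_pos, Nat.cast_add, Nat.cast_one, Nat.cast_zero] <;>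
      split_ifs with hthr
    all_goals first
      | (symm; rw [decide_eq_true_eq]; omega)
      | (rw [ih _ _ _ hthr, decide_eq_decide]; omega)
      | (rw [ih _ _ _ h, decide_eq_decide]; omega)

-- A's three counting folds are countP's over the mapped names list.
lemma pv_fold_count (names : List String) (kws : List String) :
    names.foldl (fun acc name => if pv_matches name kws then acc + 1 else acc) (0 : Int) =
      (names.countP (fun name => pv_matches name kws) : Int) := by
  rw [PySem.List.foldl_count_if (fun name => pv_matches name kws) names 0, zero_add]

lemma pv_countP_names (nodes : List (List (String × String))) (kws : List String) :
    ((nodes.map pv_nameOf).countP (fun name => pv_matches name kws) : Nat) =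
      nodes.countP (fun node => pv_matches (pv_nameOf node) kws) := by
  rw [List.countP_map]; rfl


-- ===== VERDICT (by name: the statement is the Claim_ definition above) =====
theorem is_classroom_graph_spec : Claim_equal_is_classroom_graph := by
  intro graph prompt _hdom
  unfold Spec_is_classroom_graph is_classroom_graph is_classroom_graph_alt
  by_cases hg : (["classroom", "school", "lecture", "teacher", "student"].any
      (fun token => PySem.Str.isIn token (PySem.Str.lower prompt))) = true
  · simp only [hg, if_true]
  · simp only [hg, if_false, Bool.false_eq_true]
    rw [pv_goB_eq _ 0 0 0 (by omega)]
    have hmap : ((PySem.Dict.mk graph).getD "nodes" []).map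
        (fun node => PySem.Str.lower ((PySem.Dict.mk node).getD "name" "")) =
        ((PySem.Dict.mk graph).getD "nodes" []).map pv_nameOf := rfl
    rw [hmap, pv_fold_count, pv_fold_count, pv_fold_count,
      pv_countP_names, pv_countP_names, pv_countP_names]
    have hd : (fun node => pv_matches (pv_nameOf node) ["desk", "table"]) = pv_pd := rfl
    have hc : (fun node => pv_matches (pv_nameOf node) ["chair"]) = pv_pc := rfl
    have hb : (fun node => pv_matches (pv_nameOf node) ["board", "blackboard"]) = pv_pb := rfl
    rw [hd, hc, hb]
    simp only [ge_iff_le, zero_add, Bool.decide_and, Bool.and_assoc]
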